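-- pv_equiv track=rewrite | github.com/dwilliams27/psp-autodecomp | tools/call_graph.py | find_containing_func
-- ===== SOURCE A (Python) =====
-- def find_containing_func(ranges, addr):
--     """Find which function contains a given address using binary search."""
--     lo, hi = 0, len(ranges) - 1
--     while lo <= hi:
--         mid = (lo + hi) // 2
--         start, end, func = ranges[mid]
--         if addr < start:
--             hi = mid - 1
--         elif addr >= end:
--             lo = mid + 1
--         else:
--             return func
--     return None
-- ===== SOURCE B (Python) =====
-- def find_containing_func(ranges, addr):
--     """Find which function contains a given address, by recursive
--     divide-and-conquer on list halves around the pivot element."""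
--     if not ranges:
--         return None
--     m = (len(ranges) - 1) // 2
--     pivot, *rest = ranges[m:]
--     start, end, func = pivot
--     if addr < start:
--         return find_containing_func(ranges[:m], addr)
--     if addr >= end:
--         return find_containing_func(rest, addr)
--     return func
-- ===== Notes on version B (the rewrite author's own statement) =====
-- stated objective: alternative
-- what changed: Replaces the iterative lo/hi index loop by a recursive divide-and-conquer that destructures the list itself: it splits ranges at the pivot m=(len-1)//2 (the same element the loop probes) and recurses on the left or right half, so no index bookkeeping remains.
import Mathlib
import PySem

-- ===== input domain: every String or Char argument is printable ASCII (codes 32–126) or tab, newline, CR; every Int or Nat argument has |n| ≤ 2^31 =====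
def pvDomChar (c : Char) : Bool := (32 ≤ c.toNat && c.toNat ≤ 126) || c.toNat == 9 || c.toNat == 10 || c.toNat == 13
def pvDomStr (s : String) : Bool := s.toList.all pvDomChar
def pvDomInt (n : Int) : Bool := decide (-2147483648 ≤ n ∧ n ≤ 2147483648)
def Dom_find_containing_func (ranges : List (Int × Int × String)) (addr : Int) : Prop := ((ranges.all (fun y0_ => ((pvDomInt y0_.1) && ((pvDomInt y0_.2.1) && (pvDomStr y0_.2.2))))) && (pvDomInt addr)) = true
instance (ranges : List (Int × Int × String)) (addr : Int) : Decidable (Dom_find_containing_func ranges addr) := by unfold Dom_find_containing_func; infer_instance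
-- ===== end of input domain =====

-- B replaces A's iterative lo/hi index loop by a structurally recursive divide-and-conquer
-- that destructures the list around the same pivot element; objective: alternative (not faster).

-- ===== PORT A =====
-- the while-loop of A; the Nat fuel is only a structural-termination guard (the window
-- shrinks every iteration, so the entry call's fuel ranges.length + 1 is never exhausted);
-- ranges[mid] via pyGet?: the 'none' (IndexError) branch is unreachable from the entry call (0 ≤ lo, hi ≤ len-1)
def find_containing_func_loop (ranges : List (Int × Int × String)) (addr : Int) : Nat → Int → Int → Option String
  | 0, _, _ => none
  | fuel + 1, lo, hi =>
    if lo ≤ hi then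
      let mid := PySem.Int.floordiv (lo + hi) 2
      match PySem.List.pyGet? ranges mid with
      | none => none
      | some (start, «end», func) =>
        if addr < start then find_containing_func_loop ranges addr fuel lo (mid - 1)
        else if addr ≥ «end» then find_containing_func_loop ranges addr fuel (mid + 1) hi
        else some func
    else none

def find_containing_func (ranges : List (Int × Int × String)) (addr : Int) : Option String :=
  find_containing_func_loop ranges addr (ranges.length + 1) 0 ((ranges.length : Int) - 1)

-- ===== PORT B =====
-- Source B: structural recursion on the list; the pivot index m = (len-1)//2 is a Nat (the list is
-- nonempty, so Nat subtraction/division are exact here); 'pivot, *rest = ranges[m:]' becomes the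
-- pivot lookup (r :: rs)[m]? (its none branch is unreachable, m < length) and the drop (m+1);
-- the Nat fuel is only a structural-termination guard (each recursive call's list is strictly
-- shorter, so the entry call's fuel ranges.length + 1 is never exhausted)
def find_containing_func_alt_go : Nat → List (Int × Int × String) → Int → Option String
  | 0, _, _ => none
  | _ + 1, [], _ => none
  | fuel + 1, r :: rs, addr =>
    let m := ((r :: rs).length - 1) / 2
    match (r :: rs)[m]? with
    | none => none
    | some (start, «end», func) =>
      if addr < start then find_containing_func_alt_go fuel ((r :: rs).take m) addr
      else if addr ≥ «end» then find_containing_func_alt_go fuel ((r :: rs).drop (m + 1)) addr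
      else some func

def find_containing_func_alt (ranges : List (Int × Int × String)) (addr : Int) : Option String :=
  find_containing_func_alt_go (ranges.length + 1) ranges addr

-- ===== PRECONDITION & SPEC =====
def Spec_find_containing_func (ranges : List (Int × Int × String)) (addr : Int) (out : Option String) : Prop := out = find_containing_func_alt ranges addr
instance (ranges : List (Int × Int × String)) (addr : Int) (out : Option String) : Decidable (Spec_find_containing_func ranges addr out) := by unfold Spec_find_containing_func; infer_instance

-- ===== CLAIM (what is proved, stated in full; the proofs are below) =====
def Claim_equal_find_containing_func : Prop := ∀ (ranges : List (Int × Int × String)) (addr : Int), Dom_find_containing_func ranges addr → Spec_find_containing_func ranges addr (find_containing_func ranges addr)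

-- ===== LEMMAS AND PROOFS =====

-- key invariant: A's loop on window [lo, hi] computes B's divide-and-conquer on the
-- sublist ranges[lo : hi+1], for any fuel strictly above the window size
theorem loop_eq_alt (f : Nat) : ∀ (g : Nat) (ranges : List (Int × Int × String)) (addr lo hi : Int),
    0 ≤ lo → hi < (ranges.length : Int) → (hi + 1 - lo).toNat < f → (hi + 1 - lo).toNat < g →
    find_containing_func_loop ranges addr f lo hi
      = find_containing_func_alt_go g ((ranges.drop lo.toNat).take (hi + 1 - lo).toNat) addr := by
  induction f with
  | zero =>
    intro g ranges addr lo hi _ _ hf _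
    exact absurd hf (Nat.not_lt_zero _)
  | succ f ih =>
    intro g ranges addr lo hi hlo hhi hf hg
    obtain ⟨g', rfl⟩ : ∃ g', g = g' + 1 := ⟨g - 1, by omega⟩
    set n := (hi + 1 - lo).toNat with hndef
    set sub := (ranges.drop lo.toNat).take n with hsubdef
    by_cases hle : lo ≤ hi
    · have hmid := PySem.Int.floordiv_two_mid_bounds hle
      set mid := PySem.Int.floordiv (lo + hi) 2 with hmiddef
      have hmide : mid = (lo + hi) / 2 := PySem.Int.floordiv_eq_ediv_of_pos (by omega)
      have hmid0 : (0:Int) ≤ mid := by omega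
      have hmidlt : mid < (ranges.length : Int) := by omega
      have hA : PySem.List.pyGet? ranges mid = some (ranges[mid.toNat]'(by omega)) :=
        PySem.List.pyGet?_eq_some_getElem ranges hmid0 hmidlt
      have hsublen : sub.length = n := by
        simp only [hsubdef, List.length_take, List.length_drop]
        omega
      obtain ⟨s, ss, hss⟩ : ∃ s ss, sub = s :: ss := by
        cases hc : sub with
        | nil => rw [hc] at hsublen; simp at hsublen; omega
        | cons s ss => exact ⟨s, ss, rfl⟩
      set m := ((s :: ss).length - 1) / 2 with hmdef
      have hmn : m = (n - 1) / 2 := by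
        rw [hmdef, ← hss, hsublen]
      have hmval : lo.toNat + m = mid.toNat := by
        rw [hmn, hmide, hndef]
        omega
      have hmlt : m < sub.length := by rw [hsublen, hmn]; omega
      have hsubget : sub[m]'hmlt = ranges[mid.toNat]'(by omega) := by
        simp only [hsubdef, List.getElem_take, List.getElem_drop]
        congr 1
      have hB : (s :: ss)[m]? = some (ranges[mid.toNat]'(by omega)) := by
        rw [← hss, List.getElem?_eq_getElem hmlt, hsubget]
      rcases hv : ranges[mid.toNat]'(by omega) with ⟨start, «end», func⟩
      rw [hv] at hA hB
      rw [find_containing_func_loop]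
      rw [hss, find_containing_func_alt_go]
      simp only [← hmiddef, ← hmdef, hA, hB, if_pos hle]
      by_cases h1 : addr < start
      · rw [if_pos h1, if_pos h1]
        rw [ih g' ranges addr lo (mid - 1) hlo (by omega) (by omega) (by omega)]
        rw [← hss, hsubdef, List.take_take]
        have hidx : min m n = (mid - 1 + 1 - lo).toNat := by omega
        rw [hidx]
      · rw [if_neg h1, if_neg h1]
        by_cases h2 : addr ≥ «end»
        · rw [if_pos h2, if_pos h2]
          rw [ih g' ranges addr (mid + 1) hi (by omega) (by omega) (by omega) (by omega)]
          rw [← hss, hsubdef, List.drop_take, List.drop_drop]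
          have h2a : lo.toNat + (m + 1) = (mid + 1).toNat := by omega
          have h2b : n - (m + 1) = (hi + 1 - (mid + 1)).toNat := by omega
          rw [h2a, h2b]
        · rw [if_neg h2, if_neg h2]
    · have h0 : n = 0 := by omega
      rw [find_containing_func_loop, if_neg hle]
      rw [hsubdef, h0]
      simp [find_containing_func_alt_go]

-- ===== VERDICT (by name: the statement is the Claim_ definition above) =====
theorem find_containing_func_spec : Claim_equal_find_containing_func := by
  intro ranges addr _
  unfold Spec_find_containing_func find_containing_func find_containing_func_alt
  rw [loop_eq_alt (ranges.length + 1) (ranges.length + 1) ranges addr 0 ((ranges.length : Int) - 1)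
    (by omega) (by omega) (by omega) (by omega)]
  congr 1
  have h1 : (((ranges.length : Int) - 1 + 1 - 0)).toNat = ranges.length := by omega
  rw [h1]
  simp
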